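-- pv_equiv track=rewrite | github.com/simonecollier/fish-dvis | data_scripts/debug_dataset.py | has_consecutive_annotations
-- ===== SOURCE A (Python) =====
-- def has_consecutive_annotations(annos, num):
--     count = 0
--     for a in annos:
--         if a:
--             count += 1
--             if count >= num:
--                 return True
--         else:
--             count = 0
--     return False
-- ===== SOURCE B (Python) =====
-- def has_consecutive_annotations(annos, num):
--     # group-then-measure: collect the lengths of all maximal truthy runs,
--     # then ask whether any run is long enough
--     items = list(annos)
--     n = len(items)
--     lengths = []
--     i = 0
--     while i < n:
--         if items[i]:
--             j = i
--             while j < n and items[j]: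
--                 j += 1
--             lengths.append(j - i)
--             i = j
--         else:
--             i += 1
--     return any(L >= num for L in lengths)
-- ===== Notes on version B (the rewrite author's own statement) =====
-- stated objective: alternative
-- what changed: Replaces the running counter with reset by a group-then-measure formulation: split the list into maximal truthy runs, collect their lengths, then any(L >= num).
import Mathlib
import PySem

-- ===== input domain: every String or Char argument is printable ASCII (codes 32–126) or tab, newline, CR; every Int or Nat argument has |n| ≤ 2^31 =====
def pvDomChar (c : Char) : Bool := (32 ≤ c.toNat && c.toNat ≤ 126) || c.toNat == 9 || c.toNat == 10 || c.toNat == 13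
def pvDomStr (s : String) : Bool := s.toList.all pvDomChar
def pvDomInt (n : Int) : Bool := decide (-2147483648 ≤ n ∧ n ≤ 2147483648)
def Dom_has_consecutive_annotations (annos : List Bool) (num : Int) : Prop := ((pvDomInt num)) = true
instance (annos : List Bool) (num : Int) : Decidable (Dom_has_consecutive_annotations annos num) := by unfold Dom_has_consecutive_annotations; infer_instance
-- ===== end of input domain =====

-- B replaces A's running counter with reset by group-then-measure: collect maximal truthy-run lengths, then check any(L >= num).


-- ===== PORT A =====
-- the for-loop over annos carrying the counter `count`
def hcaLoop (annos : List Bool) (count : Int) (num : Int) : Bool :=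
  match annos with
  | [] => false
  | a :: rest =>
    if a then
      (if count + 1 ≥ num then true else hcaLoop rest (count + 1) num)
    else
      hcaLoop rest 0 num

def has_consecutive_annotations (annos : List Bool) (num : Int) : Bool :=
  hcaLoop annos 0 num

-- ===== PORT B =====
-- lengths of all maximal truthy runs (B's outer while loop; the inner while
-- measures the truthy prefix, the slice rest[run:] is the corresponding drop)
def hcaRuns (annos : List Bool) : List Int :=
  match annos with
  | [] => []
  | a :: rest =>
    if a then (1 + ((rest.takeWhile id).length : Int)) :: hcaRuns (rest.dropWhile id)
    else hcaRuns rest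
termination_by annos.length
decreasing_by
  · simp only [List.length_cons]
    exact Nat.lt_succ_of_le (List.length_dropWhile_le id rest)
  · simp

def has_consecutive_annotations_alt (annos : List Bool) (num : Int) : Bool :=
  (hcaRuns annos).any (fun L => L ≥ num)

-- ===== PRECONDITION & SPEC =====
def Spec_has_consecutive_annotations (annos : List Bool) (num : Int) (out : Bool) : Prop := out = has_consecutive_annotations_alt annos num
instance (annos : List Bool) (num : Int) (out : Bool) : Decidable (Spec_has_consecutive_annotations annos num out) := by unfold Spec_has_consecutive_annotations; infer_instance

-- ===== CLAIM (what is proved, stated in full; the proofs are below) =====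
def Claim_equal_has_consecutive_annotations : Prop := ∀ (annos : List Bool) (num : Int), Dom_has_consecutive_annotations annos num → Spec_has_consecutive_annotations annos num (has_consecutive_annotations annos num)

-- ===== LEMMAS AND PROOFS =====

-- running A's loop across one maximal truthy prefix
theorem hcaLoop_run (num : Int) : ∀ (ys : List Bool) (c : Int),
    hcaLoop ys c num =
      (if c + ((ys.takeWhile id).length : Int) ≥ num ∧ 1 ≤ (ys.takeWhile id).length then true
       else hcaLoop (ys.dropWhile id) (c + ((ys.takeWhile id).length : Int)) num) := by
  intro ys
  induction ys with
  | nil => intro c; simp [hcaLoop, List.takeWhile, List.dropWhile]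
  | cons a rest ih =>
    intro c
    cases a with
    | false => simp [List.takeWhile, List.dropWhile, id]
    | true =>
      have htw : ((true :: rest).takeWhile id) = true :: rest.takeWhile id := by
        simp [List.takeWhile, id]
      have hdw : ((true :: rest).dropWhile id) = rest.dropWhile id := by
        simp [List.dropWhile, id]
      rw [htw, hdw]
      simp only [hcaLoop, List.length_cons]
      rw [if_pos trivial, ih (c + 1)]
      by_cases h1 : c + 1 ≥ num
      · rw [if_pos h1, if_pos ⟨by push_cast; omega, by omega⟩]
      · rw [if_neg h1]
        by_cases h2 : c + 1 + ((rest.takeWhile id).length : Int) ≥ num ∧ 1 ≤ (rest.takeWhile id).length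
        · rw [if_pos h2, if_pos ⟨by push_cast; omega, by omega⟩]
        · rw [if_neg h2, if_neg (by push_cast at h2 ⊢; omega)]
          congr 1
          push_cast; ring

-- after a maximal truthy run A's loop restarts with count 0
theorem hcaLoop_reset (num : Int) : ∀ (zs : List Bool) (c : Int),
    zs.takeWhile id = [] → hcaLoop zs c num = hcaLoop zs 0 num := by
  intro zs c htw
  cases zs with
  | nil => rfl
  | cons a rest =>
    cases a with
    | false => simp [hcaLoop]
    | true => simp [List.takeWhile, id] at htw

theorem takeWhile_dropWhile_id (rest : List Bool) :
    (rest.dropWhile id).takeWhile id = [] := by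
  cases hdrop : rest.dropWhile id with
  | nil => simp
  | cons b zs =>
    have hb : id b = false := by
      have h := List.head_dropWhile_not (p := id) (l := rest) (by simp [hdrop])
      simpa [hdrop] using h
    simp [List.takeWhile, show b = false from hb]

theorem hcaLoop_eq_alt (num : Int) : ∀ (xs : List Bool),
    hcaLoop xs 0 num = (hcaRuns xs).any (fun L => L ≥ num) := by
  intro xs
  induction hn : xs.length using Nat.strong_induction_on generalizing xs with
  | _ n ih =>
    cases xs with
    | nil => simp [hcaLoop, hcaRuns]
    | cons a rest =>
      cases a with
      | false =>
        have h1 : hcaLoop (false :: rest) 0 num = hcaLoop rest 0 num := rfl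
        have h2 : hcaRuns (false :: rest) = hcaRuns rest := by simp [hcaRuns]
        rw [h1, h2]
        subst hn
        exact ih rest.length (by simp) rest rfl
      | true =>
        rw [hcaLoop_run num (true :: rest) 0]
        have htw : ((true :: rest).takeWhile id) = true :: rest.takeWhile id := by
          simp [List.takeWhile, id]
        have hdw : ((true :: rest).dropWhile id) = rest.dropWhile id := by
          simp [List.dropWhile, id]
        rw [htw, hdw]
        have hruns : hcaRuns (true :: rest)
            = (1 + ((rest.takeWhile id).length : Int)) :: hcaRuns (rest.dropWhile id) := by
          simp [hcaRuns]
        rw [hruns, List.any_cons]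
        have hrest : hcaLoop (rest.dropWhile id) 0 num
            = (hcaRuns (rest.dropWhile id)).any (fun L => L ≥ num) := by
          subst hn
          exact ih (rest.dropWhile id).length
            (Nat.lt_succ_of_le (List.length_dropWhile_le id rest)) _ rfl
        by_cases hge : 1 + ((rest.takeWhile id).length : Int) ≥ num
        · rw [if_pos ⟨by simp only [List.length_cons]; push_cast; omega, by simp only [List.length_cons]; omega⟩]
          rw [decide_eq_true hge, Bool.true_or]
        · rw [if_neg (by simp only [List.length_cons]; push_cast; omega)]
          rw [hcaLoop_reset num (rest.dropWhile id) _ (takeWhile_dropWhile_id rest), hrest]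
          rw [decide_eq_false hge, Bool.false_or]

-- ===== VERDICT (by name: the statement is the Claim_ definition above) =====
theorem has_consecutive_annotations_spec : Claim_equal_has_consecutive_annotations := by
  intro annos num _
  unfold Spec_has_consecutive_annotations has_consecutive_annotations has_consecutive_annotations_alt
  exact hcaLoop_eq_alt num annos
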